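-- pv_equiv track=rewrite | github.com/injeChoi/Problem_Solving | Programmers/Level_3/다단계칫솔판매.py | solution
-- ===== SOURCE A (Python) =====
-- from collections import defaultdict
--
-- def solution(enroll, referral, seller, amount):
--     answer = []
--     relationship = defaultdict(str)
--     hierarchy = defaultdict(int)
--
--     for enr, ref in zip(enroll, referral):
--         relationship[enr] = ref
--
--     def recu(person, money):
--         give = money // 10
--         take = money - give
--         hierarchy[person] += take
--
--         if relationship[person] == "-" or give == 0:
--             return
--
--         recu(relationship[person], give)
--
--     for person, m in zip(seller, amount):
--         money = m * 100
--         recu(person, money)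
--
--     for name in enroll:
--         answer.append(hierarchy[name])
--
--     return answer
-- ===== SOURCE B (Python) =====
-- from collections import Counter
--
-- def chain_cuts(parent, person, base):
--     # the money at depth k is base // 10**k (floor division composes),
--     # so the cut taken at depth k is base // 10**k - base // 10**(k+1)
--     cuts = []
--     k = 0
--     while True:
--         cur = base // 10 ** k
--         nxt = base // 10 ** (k + 1)
--         cuts.append((person, cur - nxt))
--         if parent.get(person, "") == "-" or nxt == 0:
--             return cuts
--         person = parent.get(person, "")
--         k += 1
--
-- def solution(enroll, referral, seller, amount):
--     parent = dict(zip(enroll, referral))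
--     totals = Counter()
--     for person, take in (c for p, m in zip(seller, amount) for c in chain_cuts(parent, p, m * 100)):
--         totals[person] += take
--     return [totals[name] for name in enroll]
-- ===== Notes on version B (the rewrite author's own statement) =====
-- stated objective: alternative
-- what changed: Instead of a recursive helper that carries the remaining money and mutates a defaultdict, B uses the closed form money-at-depth-k = m*100 // 10**k (floor division composes) to turn each sale into a flat list of (beneficiary, cut) pairs with an iterative chain walk, then aggregates all pairs into a Counter and reads it back.
import Mathlib
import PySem

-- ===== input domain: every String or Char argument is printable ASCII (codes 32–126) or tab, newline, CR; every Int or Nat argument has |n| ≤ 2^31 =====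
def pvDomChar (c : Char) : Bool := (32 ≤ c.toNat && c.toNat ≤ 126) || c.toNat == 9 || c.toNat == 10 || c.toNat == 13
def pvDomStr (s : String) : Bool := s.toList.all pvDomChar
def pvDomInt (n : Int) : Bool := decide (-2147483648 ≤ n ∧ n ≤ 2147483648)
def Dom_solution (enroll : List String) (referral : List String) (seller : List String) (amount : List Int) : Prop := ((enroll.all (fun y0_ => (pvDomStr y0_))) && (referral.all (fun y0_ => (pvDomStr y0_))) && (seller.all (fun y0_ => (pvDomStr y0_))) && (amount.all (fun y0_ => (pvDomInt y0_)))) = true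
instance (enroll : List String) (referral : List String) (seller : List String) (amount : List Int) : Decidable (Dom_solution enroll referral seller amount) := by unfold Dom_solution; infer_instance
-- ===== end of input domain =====

-- B replaces A's recursive defaultdict-mutating helper by a closed-form per-depth cut
-- (the money at depth k is m*100 // 10**k, since floor division composes): each sale is turned
-- into a flat list of (beneficiary, cut) pairs which are then aggregated into a Counter
-- (objective: alternative). Return-value equivalence only; neither version mutates its arguments.

-- ===== PORT A =====
-- recu(person, money): on Pre_ inputs within Dom the recursion depth is at most enroll.length+1
-- (negative money: the chain reaches '-' within that many steps) or ~14 (nonnegative money: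
-- give reaches 0), so fuel enroll.length+100 is never exhausted there.
def recuA (rel : PySem.Dict String String) : Nat → String → Int → PySem.Dict String Int → PySem.Dict String Int
  | 0, _, _, h => h
  | fuel+1, person, money, h =>
    let give := PySem.Int.floordiv money 10
    let take := money - give
    let h := h.insert person (h.getD person 0 + take)
    if rel.getD person "" == "-" || give == 0 then h
    else recuA rel fuel (rel.getD person "") give h

def solution (enroll : List String) (referral : List String) (seller : List String) (amount : List Int) : List Int :=
  let relationship := (enroll.zip referral).foldl (fun d p => d.insert p.1 p.2) (PySem.Dict.empty)
  let hierarchy := (seller.zip amount).foldl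
    (fun h p => recuA relationship (enroll.length + 100) p.1 (p.2 * 100) h) (PySem.Dict.empty)
  enroll.foldl (fun answer name => answer ++ [hierarchy.getD name 0]) []

-- ===== PORT B =====
-- chain_cuts: the 'while True' loop emitting (person, base//10**k - base//10**(k+1)) pairs,
-- with the same fuel guard for totality (never exhausted on Pre_ inputs within Dom)
def chainCuts (parent : PySem.Dict String String) : Nat → String → Int → Nat → List (String × Int)
  | 0, _, _, _ => []
  | fuel+1, person, base, k =>
    let cur := PySem.Int.floordiv base ((10 : Int) ^ k)
    let nxt := PySem.Int.floordiv base ((10 : Int) ^ (k + 1))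
    if parent.getD person "" == "-" || nxt == 0 then [(person, cur - nxt)]
    else (person, cur - nxt) :: chainCuts parent fuel (parent.getD person "") base (k + 1)

def solution_alt (enroll : List String) (referral : List String) (seller : List String) (amount : List Int) : List Int :=
  let parent := (enroll.zip referral).foldl (fun d p => d.insert p.1 p.2) (PySem.Dict.empty)
  -- the generator flattening all sales' cuts, then the Counter accumulation totals[person] += take
  let totals := ((seller.zip amount).flatMap
      (fun p => chainCuts parent (enroll.length + 100) p.1 (p.2 * 100) 0)).foldl
    (fun d c => d.insert c.1 (d.getD c.1 0 + c.2)) (PySem.Dict.empty)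
  enroll.map (fun name => totals.getD name 0)

-- ===== PRECONDITION & SPEC =====
-- the relationship map, stated independently of the ports for Pre_'s sake
def preRel (enroll : List String) (referral : List String) : PySem.Dict String String :=
  (enroll.zip referral).foldl (fun d p => d.insert p.1 p.2) (PySem.Dict.empty)

-- '-' is reachable from p in the referral graph within the given number of upward steps
def reachesDash (rel : PySem.Dict String String) : Nat → String → Bool
  | 0, _ => false
  | fuel+1, p => if rel.getD p "" == "-" then true else reachesDash rel fuel (rel.getD p "")

-- Pre_ excludes exactly the inputs on which A does not return: for a sale with negative amount
-- give = money//10 stays negative, so recu stops only on '-'; if the seller's referral chain never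
-- reaches '-' (a cycle or a missing key) A exceeds Python's recursion limit (RecursionError) and
-- B's while loop diverges. If '-' is reachable at all it is reached within enroll.length+1 steps
-- (a longer walk revisits a key and cycles), so the bound excludes nothing A returns on.
def Pre_solution (enroll : List String) (referral : List String) (seller : List String) (amount : List Int) : Prop :=
  ∀ p ∈ seller.zip amount, 0 ≤ p.2 ∨ reachesDash (preRel enroll referral) (enroll.length + 1) p.1 = true
instance (enroll : List String) (referral : List String) (seller : List String) (amount : List Int) : Decidable (Pre_solution enroll referral seller amount) := by unfold Pre_solution; infer_instance

def pvWitness_solution : List String × List String × List String × List Int :=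
  (["john", "mary", "edward"], ["-", "john", "mary"], ["edward", "mary"], [-12, 5])

def Spec_solution (enroll : List String) (referral : List String) (seller : List String) (amount : List Int) (out : List Int) : Prop := out = solution_alt enroll referral seller amount
instance (enroll : List String) (referral : List String) (seller : List String) (amount : List Int) (out : List Int) : Decidable (Spec_solution enroll referral seller amount out) := by unfold Spec_solution; infer_instance

-- ===== CLAIM =====
def Claim_equal_solution : Prop := ∀ (enroll : List String) (referral : List String) (seller : List String) (amount : List Int), Dom_solution enroll referral seller amount → Pre_solution enroll referral seller amount → Spec_solution enroll referral seller amount (solution enroll referral seller amount)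

-- ===== LEMMAS AND PROOFS =====

-- floor division composes: (a // 10^k) // 10 = a // 10^(k+1)
theorem floordiv_pow_step (a : Int) (k : Nat) :
    PySem.Int.floordiv (PySem.Int.floordiv a ((10 : Int) ^ k)) 10
      = PySem.Int.floordiv a ((10 : Int) ^ (k + 1)) := by
  rw [PySem.Int.floordiv_eq_ediv_of_pos (b := (10:Int)^k) (by positivity),
      PySem.Int.floordiv_eq_ediv_of_pos (by norm_num),
      PySem.Int.floordiv_eq_ediv_of_pos (by positivity), pow_succ]
  exact Int.ediv_ediv_of_nonneg (by positivity)

theorem floordiv_pow_zero (a : Int) : PySem.Int.floordiv a ((10 : Int) ^ 0) = a := by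
  rw [pow_zero, PySem.Int.floordiv_eq_ediv_of_pos (by norm_num)]
  exact Int.ediv_one a

-- A's dict-mutating walk performs, step for step, exactly the insert-add of B's cut list
theorem recuA_eq_foldl_chainCuts (rel : PySem.Dict String String) :
    ∀ (fuel : Nat) (person : String) (base : Int) (k : Nat) (h : PySem.Dict String Int),
      recuA rel fuel person (PySem.Int.floordiv base ((10 : Int) ^ k)) h
        = (chainCuts rel fuel person base k).foldl
            (fun d c => d.insert c.1 (d.getD c.1 0 + c.2)) h := by
  intro fuel
  induction fuel with
  | zero => intro person base k h; rfl
  | succ n ih =>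
    intro person base k h
    simp only [recuA, chainCuts, floordiv_pow_step]
    split
    · rfl
    · simp only [List.foldl_cons]
      exact ih (rel.getD person "") base (k + 1) _

theorem sales_fold (rel : PySem.Dict String String) (F : Nat) (sales : List (String × Int)) :
    ∀ h : PySem.Dict String Int,
      sales.foldl (fun h p => recuA rel F p.1 (p.2 * 100) h) h
        = (sales.flatMap (fun p => chainCuts rel F p.1 (p.2 * 100) 0)).foldl
            (fun d c => d.insert c.1 (d.getD c.1 0 + c.2)) h := by
  induction sales with
  | nil => intro h; rfl
  | cons p rest ih =>
    intro h
    simp only [List.foldl_cons, List.flatMap_cons, List.foldl_append]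
    have e : recuA rel F p.1 (p.2 * 100) h
        = (chainCuts rel F p.1 (p.2 * 100) 0).foldl
            (fun d c => d.insert c.1 (d.getD c.1 0 + c.2)) h := by
      conv_lhs => rw [← floordiv_pow_zero (p.2 * 100)]
      exact recuA_eq_foldl_chainCuts rel F p.1 (p.2 * 100) 0 h
    rw [e]
    exact ih _

theorem foldl_append_map (f : String → Int) (l : List String) :
    ∀ acc : List Int, l.foldl (fun ans name => ans ++ [f name]) acc = acc ++ l.map f := by
  induction l with
  | nil => intro acc; simp
  | cons x rest ih => intro acc; simp [List.foldl_cons, ih]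

-- ===== VERDICT =====
theorem solution_spec : Claim_equal_solution := by
  intro enroll referral seller amount _ _
  unfold Spec_solution solution solution_alt
  simp only [sales_fold, foldl_append_map, List.nil_append]
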